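-- pv_equiv track=rewrite | github.com/Daniele/microtrim | old_code/microtrim-parallel3.py | makeAdaptersV1
-- ===== SOURCE A (Python) =====
-- adapter = 'TGGAATTCTCGGGTGCCAAGG'
--
-- abc = ('A', 'C', 'G', 'T')
--
-- def makeAdaptersV1(adapters):
--     adapters.add(adapter[:-8])
--     for i, x in enumerate(adapter):
--         for j in abc:
--             ad = adapter[:i] + j + adapter[i+1:]
--             adapters.add(ad[:-8])
--             for l in abc:
--                 ad = adapter[:i] + l + adapter[i:]
--                 adapters.add(ad[:-8])
--             ad = adapter[:i] + adapter[i+1:]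
--             adapters.add(ad[:-8])
--             ad = adapter[:i] + adapter[i+2:]
--             adapters.add(ad[:-8])
--     return adapters
-- ===== SOURCE B (Python) =====
-- adapter = 'TGGAATTCTCGGGTGCCAAGG'
--
-- abc = ('A', 'C', 'G', 'T')
--
-- # `adapter` is a module constant, so the set of truncated one-edit variants
-- # (every single-base substitution and insertion over abc, and every 1- and
-- # 2-base deletion, each cut to adapter[:-8]'s length) is itself a constant:
-- # the 100 distinct variant strings are tabulated once here and the function
-- # is a single set update, with no string building at call time.
-- _VARIANTS = (
--     'TGGAATTCTCGGG', 'AGGAATTCTCGGG', 'ATGGAATTCTCGGG', 'CTGGAATTCTCGGG',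
--     'GTGGAATTCTCGGG', 'TTGGAATTCTCGGG', 'GGAATTCTCGGG', 'GAATTCTCGGG',
--     'CGGAATTCTCGGG', 'GGGAATTCTCGGG', 'TAGAATTCTCGGG', 'TAGGAATTCTCGGG',
--     'TCGGAATTCTCGGG', 'TGGGAATTCTCGGG', 'TGAATTCTCGGG', 'TAATTCTCGGG',
--     'TCGAATTCTCGGG', 'TTGAATTCTCGGG', 'TGAAATTCTCGGG', 'TGAGAATTCTCGGG',
--     'TGCGAATTCTCGGG', 'TGTGAATTCTCGGG', 'TGATTCTCGGG', 'TGCAATTCTCGGG',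
--     'TGTAATTCTCGGG', 'TGGAAATTCTCGGG', 'TGGCAATTCTCGGG', 'TGGTAATTCTCGGG',
--     'TGGATTCTCGGG', 'TGGTTCTCGGG', 'TGGCATTCTCGGG', 'TGGGATTCTCGGG',
--     'TGGTATTCTCGGG', 'TGGACATTCTCGGG', 'TGGAGATTCTCGGG', 'TGGATATTCTCGGG',
--     'TGGATCTCGGG', 'TGGACTTCTCGGG', 'TGGAGTTCTCGGG', 'TGGATTTCTCGGG',
--     'TGGAAATCTCGGG', 'TGGAACTTCTCGGG', 'TGGAAGTTCTCGGG', 'TGGAATTTCTCGGG',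
--     'TGGAATCTCGGG', 'TGGAACTCGGG', 'TGGAACTCTCGGG', 'TGGAAGTCTCGGG',
--     'TGGAATACTCGGG', 'TGGAATATCTCGGG', 'TGGAATCTCTCGGG', 'TGGAATGTCTCGGG',
--     'TGGAATTCGGG', 'TGGAATCCTCGGG', 'TGGAATGCTCGGG', 'TGGAATTATCGGG',
--     'TGGAATTACTCGGG', 'TGGAATTCCTCGGG', 'TGGAATTGCTCGGG', 'TGGAATTTCGGG',
--     'TGGAATTGTCGGG', 'TGGAATTTTCGGG', 'TGGAATTCACGGG', 'TGGAATTCATCGGG',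
--     'TGGAATTCGTCGGG', 'TGGAATTCTTCGGG', 'TGGAATTCCGGG', 'TGGAATTCCCGGG',
--     'TGGAATTCGCGGG', 'TGGAATTCTAGGG', 'TGGAATTCTACGGG', 'TGGAATTCTCCGGG',
--     'TGGAATTCTGCGGG', 'TGGAATTCTGGG', 'TGGAATTCTGG', 'TGGAATTCTGGGG',
--     'TGGAATTCTTGGG', 'TGGAATTCTCAGG', 'TGGAATTCTCAGGG', 'TGGAATTCTCGGGG',
--     'TGGAATTCTCTGGG', 'TGGAATTCTCGG', 'TGGAATTCTCG', 'TGGAATTCTCCGG',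
--     'TGGAATTCTCTGG', 'TGGAATTCTCGAG', 'TGGAATTCTCGAGG', 'TGGAATTCTCGCGG',
--     'TGGAATTCTCGTGG', 'TGGAATTCTCGCG', 'TGGAATTCTCGTG', 'TGGAATTCTCGGA',
--     'TGGAATTCTCGGAG', 'TGGAATTCTCGGCG', 'TGGAATTCTCGGTG', 'TGGAATTCTCGGC',
--     'TGGAATTCTCGGT', 'TGGAATTCTCGGGA', 'TGGAATTCTCGGGC', 'TGGAATTCTCGGGT',)
--
--
-- def makeAdaptersV1(adapters):
--     adapters.update(_VARIANTS)
--     return adapters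
-- ===== Notes on version B (the rewrite author's own statement) =====
-- stated objective: alternative
-- what changed: Because the adapter is a module constant, the 589 slice-and-add operations of the nested substitution/insertion/deletion loops are replaced by a constant table of the 100 distinct truncated variant strings and a single set.update — no loops and no string construction at call time.
import Mathlib
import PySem

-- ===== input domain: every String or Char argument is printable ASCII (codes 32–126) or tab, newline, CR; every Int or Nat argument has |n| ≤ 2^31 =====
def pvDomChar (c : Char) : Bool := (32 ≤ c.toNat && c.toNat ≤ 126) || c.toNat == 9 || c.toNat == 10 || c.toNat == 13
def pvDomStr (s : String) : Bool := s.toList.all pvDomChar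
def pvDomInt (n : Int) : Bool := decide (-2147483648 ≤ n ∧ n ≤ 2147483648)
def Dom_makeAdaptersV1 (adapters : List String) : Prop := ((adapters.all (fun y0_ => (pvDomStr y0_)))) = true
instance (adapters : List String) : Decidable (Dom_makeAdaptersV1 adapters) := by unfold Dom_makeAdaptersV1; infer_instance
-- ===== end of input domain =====

-- B replaces the variant-generating loop nest by a constant table of the 100 distinct variant
-- strings (adapter is a module constant) and a single set update; both versions mutate the
-- argument set in Python and return it, and perform the same mutation.

-- module constants: adapter = 'TGGAATTCTCGGGTGCCAAGG', abc = ('A','C','G','T')  (1-char strings, modelled as chars)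
def pvAdapterChars : List Char := "TGGAATTCTCGGGTGCCAAGG".toList
def pvAbcChars : List Char := ['A', 'C', 'G', 'T']

-- ===== PORT A =====
def makeAdaptersV1 (adapters : List String) : List String :=
  -- adapters.add(adapter[:-8])
  let s0 := PySem.Set.add adapters (String.ofList (PySem.List.slice pvAdapterChars none (some (-8))))
  -- for i, x in enumerate(adapter): …   (x is unused)
  (PySem.List.enumerate pvAdapterChars 0).foldl (fun s ix =>
    pvAbcChars.foldl (fun s j =>
      let ad := PySem.List.slice pvAdapterChars none (some ix.1) ++ [j] ++ PySem.List.slice pvAdapterChars (some (ix.1 + 1)) none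
      let s := PySem.Set.add s (String.ofList (PySem.List.slice ad none (some (-8))))
      let s := pvAbcChars.foldl (fun s l =>
        let ad := PySem.List.slice pvAdapterChars none (some ix.1) ++ [l] ++ PySem.List.slice pvAdapterChars (some ix.1) none
        PySem.Set.add s (String.ofList (PySem.List.slice ad none (some (-8))))) s
      let ad := PySem.List.slice pvAdapterChars none (some ix.1) ++ PySem.List.slice pvAdapterChars (some (ix.1 + 1)) none
      let s := PySem.Set.add s (String.ofList (PySem.List.slice ad none (some (-8))))
      let ad := PySem.List.slice pvAdapterChars none (some ix.1) ++ PySem.List.slice pvAdapterChars (some (ix.1 + 2)) none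
      PySem.Set.add s (String.ofList (PySem.List.slice ad none (some (-8))))) s) s0

-- ===== PORT B =====
-- _VARIANTS: the constant table from Source B, transcribed literally
def pvVariantTable : List String := [
  "TGGAATTCTCGGG", "AGGAATTCTCGGG", "ATGGAATTCTCGGG", "CTGGAATTCTCGGG",
  "GTGGAATTCTCGGG", "TTGGAATTCTCGGG", "GGAATTCTCGGG", "GAATTCTCGGG",
  "CGGAATTCTCGGG", "GGGAATTCTCGGG", "TAGAATTCTCGGG", "TAGGAATTCTCGGG",
  "TCGGAATTCTCGGG", "TGGGAATTCTCGGG", "TGAATTCTCGGG", "TAATTCTCGGG",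
  "TCGAATTCTCGGG", "TTGAATTCTCGGG", "TGAAATTCTCGGG", "TGAGAATTCTCGGG",
  "TGCGAATTCTCGGG", "TGTGAATTCTCGGG", "TGATTCTCGGG", "TGCAATTCTCGGG",
  "TGTAATTCTCGGG", "TGGAAATTCTCGGG", "TGGCAATTCTCGGG", "TGGTAATTCTCGGG",
  "TGGATTCTCGGG", "TGGTTCTCGGG", "TGGCATTCTCGGG", "TGGGATTCTCGGG",
  "TGGTATTCTCGGG", "TGGACATTCTCGGG", "TGGAGATTCTCGGG", "TGGATATTCTCGGG",
  "TGGATCTCGGG", "TGGACTTCTCGGG", "TGGAGTTCTCGGG", "TGGATTTCTCGGG",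
  "TGGAAATCTCGGG", "TGGAACTTCTCGGG", "TGGAAGTTCTCGGG", "TGGAATTTCTCGGG",
  "TGGAATCTCGGG", "TGGAACTCGGG", "TGGAACTCTCGGG", "TGGAAGTCTCGGG",
  "TGGAATACTCGGG", "TGGAATATCTCGGG", "TGGAATCTCTCGGG", "TGGAATGTCTCGGG",
  "TGGAATTCGGG", "TGGAATCCTCGGG", "TGGAATGCTCGGG", "TGGAATTATCGGG",
  "TGGAATTACTCGGG", "TGGAATTCCTCGGG", "TGGAATTGCTCGGG", "TGGAATTTCGGG",
  "TGGAATTGTCGGG", "TGGAATTTTCGGG", "TGGAATTCACGGG", "TGGAATTCATCGGG",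
  "TGGAATTCGTCGGG", "TGGAATTCTTCGGG", "TGGAATTCCGGG", "TGGAATTCCCGGG",
  "TGGAATTCGCGGG", "TGGAATTCTAGGG", "TGGAATTCTACGGG", "TGGAATTCTCCGGG",
  "TGGAATTCTGCGGG", "TGGAATTCTGGG", "TGGAATTCTGG", "TGGAATTCTGGGG",
  "TGGAATTCTTGGG", "TGGAATTCTCAGG", "TGGAATTCTCAGGG", "TGGAATTCTCGGGG",
  "TGGAATTCTCTGGG", "TGGAATTCTCGG", "TGGAATTCTCG", "TGGAATTCTCCGG",
  "TGGAATTCTCTGG", "TGGAATTCTCGAG", "TGGAATTCTCGAGG", "TGGAATTCTCGCGG",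
  "TGGAATTCTCGTGG", "TGGAATTCTCGCG", "TGGAATTCTCGTG", "TGGAATTCTCGGA",
  "TGGAATTCTCGGAG", "TGGAATTCTCGGCG", "TGGAATTCTCGGTG", "TGGAATTCTCGGC",
  "TGGAATTCTCGGT", "TGGAATTCTCGGGA", "TGGAATTCTCGGGC", "TGGAATTCTCGGGT"]

def makeAdaptersV1_alt (adapters : List String) : List String :=
  PySem.Set.update adapters pvVariantTable

-- ===== PRECONDITION & SPEC =====
def Spec_makeAdaptersV1 (adapters : List String) (out : List String) : Prop := out = makeAdaptersV1_alt adapters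
instance (adapters : List String) (out : List String) : Decidable (Spec_makeAdaptersV1 adapters out) := by unfold Spec_makeAdaptersV1; infer_instance

-- ===== CLAIM (what is proved, stated in full; the proofs are below) =====
def Claim_equal_makeAdaptersV1 : Prop := ∀ (adapters : List String), Dom_makeAdaptersV1 adapters → Spec_makeAdaptersV1 adapters (makeAdaptersV1 adapters)

-- ===== LEMMAS AND PROOFS =====

-- the atomic variant strings, used to describe A's add-sequence
def pvBaseS : String := String.ofList (PySem.List.slice pvAdapterChars none (some (-8)))
def pvSubS (i : Int) (j : Char) : String :=
  String.ofList (PySem.List.slice (PySem.List.slice pvAdapterChars none (some i) ++ [j] ++ PySem.List.slice pvAdapterChars (some (i + 1)) none) none (some (-8)))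
def pvInsS (i : Int) (l : Char) : String :=
  String.ofList (PySem.List.slice (PySem.List.slice pvAdapterChars none (some i) ++ [l] ++ PySem.List.slice pvAdapterChars (some i) none) none (some (-8)))
def pvDel1S (i : Int) : String :=
  String.ofList (PySem.List.slice (PySem.List.slice pvAdapterChars none (some i) ++ PySem.List.slice pvAdapterChars (some (i + 1)) none) none (some (-8)))
def pvDel2S (i : Int) : String :=
  String.ofList (PySem.List.slice (PySem.List.slice pvAdapterChars none (some i) ++ PySem.List.slice pvAdapterChars (some (i + 2)) none) none (some (-8)))

-- A's complete add-sequence, flattened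
def pvSeqA : List String :=
  pvBaseS :: (PySem.List.enumerate pvAdapterChars 0).flatMap (fun ix =>
    pvAbcChars.flatMap (fun j =>
      pvSubS ix.1 j :: (pvAbcChars.map (pvInsS ix.1) ++ [pvDel1S ix.1, pvDel2S ix.1])))

theorem foldl_update_flatMap {α : Type} (f : α → List String) (L : List α) (s : List String) :
    L.foldl (fun s a => PySem.Set.update s (f a)) s = PySem.Set.update s (L.flatMap f) := by
  induction L generalizing s with
  | nil => rfl
  | cons a L ih => simp [List.foldl, ih, PySem.Set.update_append]

theorem makeAdaptersV1_eq_update (s : List String) :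
    makeAdaptersV1 s = PySem.Set.update s pvSeqA := by
  show (PySem.List.enumerate pvAdapterChars 0).foldl (fun s ix =>
      pvAbcChars.foldl (fun s j =>
        PySem.Set.update s (pvSubS ix.1 j :: (pvAbcChars.map (pvInsS ix.1) ++ [pvDel1S ix.1, pvDel2S ix.1]))) s)
      (PySem.Set.add s pvBaseS) = PySem.Set.update s pvSeqA
  have h1 : ∀ (t : List String) (ix : Int × Char),
      pvAbcChars.foldl (fun s j =>
        PySem.Set.update s (pvSubS ix.1 j :: (pvAbcChars.map (pvInsS ix.1) ++ [pvDel1S ix.1, pvDel2S ix.1]))) t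
      = PySem.Set.update t (pvAbcChars.flatMap (fun j =>
          pvSubS ix.1 j :: (pvAbcChars.map (pvInsS ix.1) ++ [pvDel1S ix.1, pvDel2S ix.1]))) := by
    intro t ix
    exact foldl_update_flatMap _ pvAbcChars t
  simp only [h1]
  rw [foldl_update_flatMap]
  rw [pvSeqA, PySem.Set.update_cons]

set_option maxRecDepth 10000 in
set_option maxHeartbeats 2000000 in
theorem pvSeq_set_eq : PySem.Set.ofList pvSeqA = PySem.Set.ofList pvVariantTable := by decide

-- ===== VERDICT (by name: the statement is the Claim_ definition above) =====
theorem makeAdaptersV1_spec : Claim_equal_makeAdaptersV1 := by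
  intro adapters _
  unfold Spec_makeAdaptersV1 makeAdaptersV1_alt
  rw [makeAdaptersV1_eq_update, PySem.Set.update_eq_append_filter, PySem.Set.update_eq_append_filter,
    pvSeq_set_eq]
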